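-- pv_equiv track=rewrite | github.com/The-devop/Cipher-Labs | crypto_core.py | hybrid_substitution_transposition
-- ===== SOURCE A (Python) =====
-- def hybrid_substitution_transposition(text: str, key: str = "SECRET") -> str:
--     """Hybrid - combine substitution and transposition"""
--     text = text.upper()
--     substituted = ''.join(chr((ord(c) - 65 + 3) % 26 + 65) if c.isalpha() else c for c in text)
--     cols = len(key)
--     rows = (len(substituted) + cols - 1) // cols
--     grid = [list(substituted[r*cols:(r+1)*cols]) for r in range(rows)]
--     key_order = sorted(range(len(key)), key=lambda i: key[i])
--     result = []
--     for col_idx in key_order: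
--         for row in grid:
--             if col_idx < len(row):
--                 result.append(row[col_idx])
--     return ''.join(result)
-- ===== SOURCE B (Python) =====
-- def hybrid_substitution_transposition(text: str, key: str = "SECRET") -> str:
--     """Hybrid - combine substitution and transposition (decorate-sort form)"""
--     text = text.upper()
--     substituted = ''.join(chr((ord(c) - 65 + 3) % 26 + 65) if c.isalpha() else c for c in text)
--     cols = len(key)
--     items = sorted(enumerate(substituted), key=lambda p: (key[p[0] % cols], p[0] % cols, p[0]))
--     return ''.join(ch for _, ch in items)
-- ===== Notes on version B (the rewrite author's own statement) =====
-- stated objective: alternative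
-- what changed: Replaces the explicit row-grid plus nested column-by-row reading loops with a single decorate-and-stable-sort pass: each character is tagged with its flat index and sorted by the tuple (key letter of its column, column index, flat index), which reproduces the key-ordered column read without building a grid.
import Mathlib
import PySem

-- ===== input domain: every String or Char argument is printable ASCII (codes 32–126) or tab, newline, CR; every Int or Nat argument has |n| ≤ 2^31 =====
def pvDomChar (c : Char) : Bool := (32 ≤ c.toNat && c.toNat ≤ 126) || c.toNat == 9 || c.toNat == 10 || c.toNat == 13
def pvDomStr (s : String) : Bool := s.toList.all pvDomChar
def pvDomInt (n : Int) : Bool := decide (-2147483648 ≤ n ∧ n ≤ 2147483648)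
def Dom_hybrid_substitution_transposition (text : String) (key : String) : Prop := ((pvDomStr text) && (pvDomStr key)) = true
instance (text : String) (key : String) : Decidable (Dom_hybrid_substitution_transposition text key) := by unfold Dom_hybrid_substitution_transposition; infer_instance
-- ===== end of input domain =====

-- B replaces A's grid building + nested column/row loops by a single decorate-and-stable-sort
-- pass (alternative decomposition, similar cost); return value only, neither mutates arguments.

-- ===== PORT A =====
-- Caesar +3 on an (already uppercased) character; ASCII isalpha — exact on Dom (printable ASCII).
def pvSubChar (c : Char) : Char :=
  if PySem.Chars.isalpha c then
    Char.ofNat (PySem.Int.mod ((c.toNat : Int) - 65 + 3) 26 + 65).toNat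
  else c

def hybrid_substitution_transposition (text : String) (key : String) : String :=
  let substituted : List Char := ((PySem.Str.upper text).toList).map pvSubChar
  let cols : Int := (key.toList.length : Int)
  let rows : Int := PySem.Int.floordiv ((substituted.length : Int) + cols - 1) cols
  let grid : List (List Char) :=
    (PySem.List.pyRange 0 rows 1).map
      (fun r => PySem.List.slice substituted (some (r * cols)) (some ((r + 1) * cols)))
  -- key[i]: i always in range here, so pyGetD with a dummy default is exact
  let key_order : List Int :=
    PySem.List.sorted (PySem.List.pyRange 0 cols 1) (fun i => PySem.List.pyGetD key.toList i ' ')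
  let result : List Char :=
    key_order.foldl (fun acc col_idx =>
      grid.foldl (fun acc row =>
        if col_idx < (row.length : Int) then acc ++ [PySem.List.pyGetD row col_idx ' '] else acc) acc) []
  String.ofList result

-- ===== PORT B =====
def hybrid_substitution_transposition_alt (text : String) (key : String) : String :=
  let substituted : List Char := ((PySem.Str.upper text).toList).map pvSubChar
  let cols : Int := (key.toList.length : Int)
  -- Python tuple key (key[i%cols], i%cols, i): ported as a lexicographic triple — exact
  -- (Python compares tuples lexicographically; indices i%cols are in range for key[·])
  let items : List (Int × Char) :=
    PySem.List.sorted (PySem.List.enumerate substituted)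
      (fun p => toLex (PySem.List.pyGetD key.toList (PySem.Int.mod p.1 cols) ' ',
                       toLex (PySem.Int.mod p.1 cols, p.1)))
  String.ofList (items.map Prod.snd)

-- ===== PRECONDITION & SPEC =====
-- Pre_ excludes exactly the empty key, on which A raises ZeroDivisionError (cols = 0 in the rows division).
def Pre_hybrid_substitution_transposition (text : String) (key : String) : Prop := key ≠ ""
instance (text : String) (key : String) : Decidable (Pre_hybrid_substitution_transposition text key) := by unfold Pre_hybrid_substitution_transposition; infer_instance
def pvWitness_hybrid_substitution_transposition : String × String := ("Hello, World!", "SECRET")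

def Spec_hybrid_substitution_transposition (text : String) (key : String) (out : String) : Prop := out = hybrid_substitution_transposition_alt text key
instance (text : String) (key : String) (out : String) : Decidable (Spec_hybrid_substitution_transposition text key out) := by unfold Spec_hybrid_substitution_transposition; infer_instance

-- ===== CLAIM (what is proved, stated in full; the proofs are below) =====
def Claim_equal_hybrid_substitution_transposition : Prop := ∀ (text : String) (key : String), Dom_hybrid_substitution_transposition text key → Pre_hybrid_substitution_transposition text key → Spec_hybrid_substitution_transposition text key (hybrid_substitution_transposition text key)

-- ===== LEMMAS AND PROOFS =====

-- (1) pointwise congruence of insertion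
theorem pv_insertBy_congr {α : Type} (b1 b2 : α → α → Bool) (x : α) (l : List α)
    (h : ∀ y ∈ l, b1 x y = b2 x y) :
    PySem.List.insertBy b1 x l = PySem.List.insertBy b2 x l := by
  induction l with
  | nil => rfl
  | cons y t ih =>
    simp only [PySem.List.insertBy, h y (List.mem_cons_self)]
    split
    · rfl
    · rw [ih (fun z hz => h z (List.mem_cons_of_mem _ hz))]

-- (2) stability lift: on a strictly increasing input list, sorting by `key` equals
-- sorting by the injective key (key i, i)
theorem pv_sorted_lift_aux {κ : Type} [LinearOrder κ] (key : Int → κ) :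
    ∀ (xs : List Int) (acc : List Int), xs.Pairwise (· < ·) →
    (∀ a ∈ acc, ∀ x ∈ xs, a < x) →
    xs.foldl (fun acc x => PySem.List.insertBy (fun a b => decide (key a < key b)) x acc) acc
      = xs.foldl (fun acc x => PySem.List.insertBy
          (fun a b => decide ((toLex (key a, a)) < toLex (key b, b))) x acc) acc := by
  intro xs
  induction xs with
  | nil => intro acc _ _; rfl
  | cons x t ih =>
    intro acc hp hacc
    simp only [List.foldl_cons]
    have hins : PySem.List.insertBy (fun a b => decide (key a < key b)) x acc
        = PySem.List.insertBy (fun a b => decide ((toLex (key a, a)) < toLex (key b, b))) x acc := by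
      apply pv_insertBy_congr
      intro y hy
      have hyx : y < x := hacc y hy x List.mem_cons_self
      apply decide_eq_decide.mpr
      rw [Prod.Lex.toLex_lt_toLex]
      constructor
      · exact Or.inl
      · rintro (h | ⟨_, hlt⟩)
        · exact h
        · exact absurd hlt (by omega)
    rw [hins, ih _ hp.of_cons]
    intro a ha x' hx'
    rcases (PySem.List.mem_insertBy _ _ _ _).mp ha with rfl | ha'
    · exact List.rel_of_pairwise_cons hp hx'
    · exact hacc a ha' x' (List.mem_cons_of_mem _ hx')

theorem pv_sorted_lift {κ : Type} [LinearOrder κ] (xs : List Int) (key : Int → κ)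
    (hx : xs.Pairwise (· < ·)) :
    PySem.List.sorted xs key = PySem.List.sorted xs (fun i => toLex (key i, i)) := by
  rw [PySem.List.sorted_eq_foldl_insertBy, PySem.List.sorted_eq_foldl_insertBy]
  exact pv_sorted_lift_aux key xs [] hx (by simp)

-- (3) enumerate as a map over range
theorem pv_enumerate_eq {α : Type} (d : α) :
    ∀ (s : List α) (st : Int), PySem.List.enumerate s st
      = (List.range s.length).map (fun i : Nat => (st + (i : Int), s.getD i d)) := by
  intro s
  induction s with
  | nil => intro st; rfl
  | cons x t ih =>
    intro st
    simp only [PySem.List.enumerate, List.length_cons, List.range_succ_eq_map, List.map_cons,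
      List.map_map, ih (st + 1)]
    refine List.cons_eq_cons.mpr ⟨by simp, ?_⟩
    apply List.map_congr_left
    intro i _
    simp only [Function.comp, List.getD_cons_succ, Nat.succ_eq_add_one, Prod.mk.injEq]
    exact ⟨by push_cast; ring, trivial⟩

-- (4) sum of an indicator map over a nodup list
theorem pv_sum_ite {γ : Type} [DecidableEq γ] (cs : List γ) (a : γ) (m : Nat)
    (hn : cs.Nodup) (ha : a ∈ cs) :
    (cs.map (fun c => if c = a then m else 0)).sum = m := by
  induction cs with
  | nil => cases ha
  | cons c t ih =>
    by_cases hca : c = a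
    · subst hca
      have hz : (t.map (fun c' => if c' = c then m else 0)) = t.map (fun _ => 0) := by
        apply List.map_congr_left
        intro z hz
        have : z ≠ c := fun h => (List.nodup_cons.mp hn).1 (h ▸ hz)
        simp [this]
      simp [hz]
    · have hat : a ∈ t := (List.mem_cons.mp ha).resolve_left (fun h => hca h.symm)
      simp [hca, ih (List.nodup_cons.mp hn).2 hat]

-- (5) partition of a list into its classes, read off along a nodup class list
theorem pv_perm_classes {β γ : Type} [DecidableEq β] [DecidableEq γ]
    (l : List β) (cls : β → γ) (cs : List γ) (hn : cs.Nodup) (hm : ∀ x ∈ l, cls x ∈ cs) :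
    (cs.flatMap (fun c => l.filter (fun x => decide (cls x = c)))).Perm l := by
  rw [List.perm_iff_count]
  intro a
  rw [List.count_flatMap]
  by_cases hal : a ∈ l
  · have terms : ∀ c ∈ cs,
        (List.count a ∘ fun c => l.filter (fun x => decide (cls x = c))) c
          = if c = cls a then l.count a else 0 := by
      intro c _
      by_cases hc : c = cls a
      · subst hc
        simp only [Function.comp_apply]
        exact List.count_filter (by simp)
      · simp only [Function.comp_apply, if_neg hc]
        rw [List.count_eq_zero]
        intro hmem
        have hcl : cls a = c := by
          have := List.of_mem_filter hmem
          simpa using this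
        exact hc hcl.symm
    rw [List.map_congr_left terms, pv_sum_ite cs (cls a) _ hn (hm a hal)]
  · rw [List.count_eq_zero.mpr hal]
    have terms : ∀ c ∈ cs,
        (List.count a ∘ fun c => l.filter (fun x => decide (cls x = c))) c = 0 := by
      intro c _
      rw [Function.comp_apply, List.count_eq_zero]
      exact fun hmem => hal (List.mem_of_mem_filter hmem)
    rw [List.map_congr_left terms]
    simp

-- (6) the indices below n in class c mod K, as a strided read of row indices
theorem pv_range_filter_mod (n K c : Nat) (hK : 0 < K) (hc : c < K) :
    (List.range n).filter (fun i => decide (i % K = c))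
      = ((List.range ((n + K - 1) / K)).map (fun r => r * K + c)).filter
          (fun i => decide (i < n)) := by
  have h1 : ((List.range n).filter (fun i => decide (i % K = c))).Pairwise (· < ·) :=
    List.pairwise_lt_range.filter _
  have h2 : (((List.range ((n + K - 1) / K)).map (fun r => r * K + c)).filter
      (fun i => decide (i < n))).Pairwise (· < ·) := by
    apply List.Pairwise.filter
    rw [List.pairwise_map]
    exact List.pairwise_lt_range.imp (fun h => by
      have := (Nat.mul_lt_mul_right hK).mpr h; omega)
  have hperm : ((List.range n).filter (fun i => decide (i % K = c))).Perm
      (((List.range ((n + K - 1) / K)).map (fun r => r * K + c)).filter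
        (fun i => decide (i < n))) := by
    rw [List.perm_ext_iff_of_nodup (h1.imp ne_of_lt) (h2.imp ne_of_lt)]
    intro a
    simp only [List.mem_filter, List.mem_range, List.mem_map, decide_eq_true_eq]
    constructor
    · rintro ⟨han, hmod⟩
      refine ⟨⟨a / K, ?_, ?_⟩, han⟩
      · have hd := Nat.div_add_mod a K
        have hle : a / K + 1 ≤ (n + K - 1) / K := by
          rw [Nat.le_div_iff_mul_le hK, Nat.add_mul, one_mul]
          have hcomm := Nat.mul_comm (a / K) K
          omega
        omega
      · have hd := Nat.div_add_mod a K
        have hcomm := Nat.mul_comm (a / K) K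
        omega
    · rintro ⟨⟨r, _, rfl⟩, hn'⟩
      refine ⟨hn', ?_⟩
      rw [Nat.mul_comm r K, Nat.mul_add_mod]
      exact Nat.mod_eq_of_lt hc
  exact hperm.eq_of_pairwise (fun a b _ _ h h' => Nat.le_antisymm h h') (h1.imp le_of_lt) (h2.imp le_of_lt)

-- (7) A's c-th filtered grid column = the characters of B's class-c block of enumerate
theorem pv_col (s kl : List Char) (cN : Nat) (hK : 0 < kl.length) (hc : cN < kl.length) :
    (((PySem.List.pyRange 0 (PySem.Int.floordiv ((s.length : Int) + (kl.length : Int) - 1) (kl.length : Int)) 1).map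
        (fun r => PySem.List.slice s (some (r * (kl.length : Int))) (some ((r + 1) * (kl.length : Int))))).filter
      (fun row => decide ((cN : Int) < (row.length : Int)))).map (fun row => PySem.List.pyGetD row (cN : Int) ' ')
    = ((PySem.List.enumerate s).filter
        (fun p => decide (PySem.Int.mod p.1 (kl.length : Int) = (cN : Int)))).map Prod.snd := by
  set n := s.length with hn
  set K := kl.length with hKdef
  set R := (n + K - 1) / K with hR
  -- rows as a Nat
  have hcast : (n : Int) + (K : Int) - 1 = ((n + K - 1 : Nat) : Int) := by omega
  rw [hcast, PySem.Int.floordiv_natCast, PySem.List.pyRange_zero_natCast]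
  -- each grid row is a take/drop
  have hrow : ∀ rN : Nat,
      PySem.List.slice s (some ((rN : Int) * (K : Int))) (some (((rN : Int) + 1) * (K : Int)))
        = (s.drop (rN * K)).take K := by
    intro rN
    have e1 : (rN : Int) * (K : Int) = ((rN * K : Nat) : Int) := by push_cast; ring
    have e2 : ((rN : Int) + 1) * (K : Int) = (((rN + 1) * K : Nat) : Int) := by push_cast; ring
    rw [e1, e2, PySem.List.slice_natCast]
    congr 1
    rw [Nat.succ_mul]
    omega
  rw [List.map_map]
  have hgridmap : (List.range R).map
      ((fun r : Int => PySem.List.slice s (some (r * (K : Int))) (some ((r + 1) * (K : Int)))) ∘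
        (fun k : Nat => ((k : Int)))) = (List.range R).map (fun rN : Nat => (s.drop (rN * K)).take K) :=
    List.map_congr_left (fun rN _ => by simpa only [Function.comp_apply] using hrow rN)
  rw [hgridmap, List.filter_map, List.map_map]
  -- LHS over row indices
  have hpred : ∀ rN : Nat,
      ((fun row : List Char => decide ((cN : Int) < (row.length : Int))) ∘
        (fun rN : Nat => (s.drop (rN * K)).take K)) rN = decide (rN * K + cN < n) := by
    intro rN
    simp only [Function.comp_apply, List.length_take, List.length_drop]
    apply decide_eq_decide.mpr
    rw [show ((min K (n - rN * K) : Nat) : Int) = ((min K (n - rN * K) : Nat) : Int) from rfl]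
    constructor
    · intro h
      have : cN < min K (n - rN * K) := by exact_mod_cast h
      omega
    · intro h
      have : cN < min K (n - rN * K) := by omega
      exact_mod_cast this
  rw [List.filter_congr (fun rN _ => hpred rN)]
  have hget : ∀ rN : Nat, rN ∈ (List.range R).filter (fun rN => decide (rN * K + cN < n)) →
      ((fun row : List Char => PySem.List.pyGetD row (cN : Int) ' ') ∘
        (fun rN : Nat => (s.drop (rN * K)).take K)) rN = s.getD (rN * K + cN) ' ' := by
    intro rN hmem
    have hlt : rN * K + cN < n := by
      have := List.of_mem_filter hmem
      simpa using this
    simp only [Function.comp_apply, PySem.List.pyGetD_natCast, List.getD_eq_getElem?_getD,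
      List.getElem?_take, List.getElem?_drop, if_pos hc]
  rw [List.map_congr_left hget]
  -- RHS: unfold enumerate and push filter/map through
  rw [pv_enumerate_eq ' ' s 0]
  simp only [zero_add]
  rw [List.filter_map, List.map_map]
  have hpred2 : ∀ i : Nat,
      ((fun p : Int × Char => decide (PySem.Int.mod p.1 (K : Int) = (cN : Int))) ∘
        (fun i : Nat => ((i : Int), s.getD i ' '))) i = decide (i % K = cN) := by
    intro i
    simp only [Function.comp_apply, PySem.Int.mod_natCast]
    apply decide_eq_decide.mpr
    exact_mod_cast Iff.rfl
  rw [List.filter_congr (fun i _ => hpred2 i)]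
  rw [pv_range_filter_mod n K cN hK hc, List.filter_map, List.map_map]
  rfl

-- (8) main: A's key-ordered column read = B's decorate-and-sort read
theorem pv_main (s kl : List Char) (hk : kl ≠ []) :
    (PySem.List.sorted (PySem.List.pyRange 0 (kl.length : Int) 1)
        (fun i => PySem.List.pyGetD kl i ' ')).foldl
      (fun acc col_idx =>
        ((PySem.List.pyRange 0
            (PySem.Int.floordiv ((s.length : Int) + (kl.length : Int) - 1) (kl.length : Int)) 1).map
          (fun r => PySem.List.slice s (some (r * (kl.length : Int)))
            (some ((r + 1) * (kl.length : Int))))).foldl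
          (fun acc row =>
            if col_idx < (row.length : Int) then acc ++ [PySem.List.pyGetD row col_idx ' '] else acc)
          acc) []
    = (PySem.List.sorted (PySem.List.enumerate s)
        (fun p => toLex (PySem.List.pyGetD kl (PySem.Int.mod p.1 (kl.length : Int)) ' ',
                         toLex (PySem.Int.mod p.1 (kl.length : Int), p.1)))).map Prod.snd := by
  have hK : 0 < kl.length := List.length_pos_of_ne_nil hk
  set K := kl.length with hKdef
  set kf : Int → Char := fun i => PySem.List.pyGetD kl i ' ' with hkf
  set lk : Int × Char → Char ×ₗ (Int ×ₗ Int) :=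
    fun p => toLex (kf (PySem.Int.mod p.1 (K : Int)),
                    toLex (PySem.Int.mod p.1 (K : Int), p.1)) with hlk
  set E : List (Int × Char) := PySem.List.enumerate s with hE
  set ko : List Int := PySem.List.sorted (PySem.List.pyRange 0 (K : Int) 1) kf with hko
  set block : Int → List (Int × Char) :=
    fun c => E.filter (fun p => decide (PySem.Int.mod p.1 (K : Int) = c)) with hblock
  -- facts about the range and key order
  have hpyr : PySem.List.pyRange 0 (K : Int) 1 = (List.range K).map (fun k : Nat => (k : Int)) :=
    PySem.List.pyRange_zero_natCast K
  have hrpw : (PySem.List.pyRange 0 (K : Int) 1).Pairwise (· < ·) := by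
    rw [hpyr, List.pairwise_map]
    exact List.pairwise_lt_range.imp (fun h => by exact_mod_cast h)
  have hkoperm : ko.Perm (PySem.List.pyRange 0 (K : Int) 1) := PySem.List.sorted_perm _ _ _
  have hkond : ko.Nodup := by
    rw [hkoperm.nodup_iff, hpyr]
    exact List.nodup_range.map (fun a b h => by exact_mod_cast h)
  have hkomem : ∀ c ∈ ko, ∃ cN : Nat, cN < K ∧ c = (cN : Int) := by
    intro c hc
    rw [hkoperm.mem_iff, hpyr, List.mem_map] at hc
    obtain ⟨cN, hcN, rfl⟩ := hc
    exact ⟨cN, List.mem_range.mp hcN, rfl⟩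
  -- element shape and index order of enumerate
  have hEmem : ∀ x ∈ E, ∃ i : Nat, i < s.length ∧ x = ((i : Int), s.getD i ' ') := by
    intro x hx
    rw [hE, pv_enumerate_eq ' ' s 0, List.mem_map] at hx
    obtain ⟨i, hi, rfl⟩ := hx
    exact ⟨i, List.mem_range.mp hi, by simp⟩
  have hEpw : E.Pairwise (fun p q => p.1 < q.1) := by
    rw [hE, pv_enumerate_eq ' ' s 0, List.pairwise_map]
    exact List.pairwise_lt_range.imp (fun h => by simpa using h)
  -- strict lexicographic order of the key order
  have hkolift : ko = PySem.List.sorted (PySem.List.pyRange 0 (K : Int) 1)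
      (fun i => toLex (kf i, i)) := pv_sorted_lift _ kf hrpw
  have hkole : ko.Pairwise (fun a b => toLex (kf a, a) ≤ toLex (kf b, b)) := by
    rw [hkolift]; exact PySem.List.sorted_pairwise _ _
  have hkolt : ko.Pairwise (fun a b => toLex (kf a, a) < toLex (kf b, b)) := by
    refine (hkole.and hkond).imp ?_
    rintro a b ⟨hle, hne⟩
    refine lt_of_le_of_ne hle (fun he => hne ?_)
    exact congrArg Prod.snd (toLex_inj.mp he)
  -- the permutation: the blocks partition enumerate
  have hperm : (ko.flatMap block).Perm E := by
    refine pv_perm_classes E (fun x => PySem.Int.mod x.1 (K : Int)) ko hkond ?_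
    intro x hx
    obtain ⟨i, hi, rfl⟩ := hEmem x hx
    rw [hkoperm.mem_iff, hpyr, List.mem_map]
    exact ⟨i % K, List.mem_range.mpr (Nat.mod_lt _ hK), by simpa using (PySem.Int.mod_natCast i K).symm⟩
  -- strict pairwise order of the concatenated blocks
  have hpw : (ko.flatMap block).Pairwise (fun x y => lk x < lk y) := by
    rw [List.pairwise_flatMap]
    constructor
    · intro c _
      refine List.Pairwise.imp_of_mem ?_ (hEpw.filter _)
      intro p q hp hq hfst
      have hpc : PySem.Int.mod p.1 (K : Int) = c := by
        have := List.of_mem_filter hp; simpa using this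
      have hqc : PySem.Int.mod q.1 (K : Int) = c := by
        have := List.of_mem_filter hq; simpa using this
      rw [hlk]
      rw [Prod.Lex.toLex_lt_toLex]
      exact Or.inr ⟨by rw [hpc, hqc], by
        rw [Prod.Lex.toLex_lt_toLex]; exact Or.inr ⟨by rw [hpc, hqc], hfst⟩⟩
    · refine hkolt.imp ?_
      intro a b hab x hx y hy
      have hxa : PySem.Int.mod x.1 (K : Int) = a := by
        have := List.of_mem_filter hx; simpa using this
      have hyb : PySem.Int.mod y.1 (K : Int) = b := by
        have := List.of_mem_filter hy; simpa using this
      rw [Prod.Lex.toLex_lt_toLex] at hab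
      simp only [hlk]
      rw [Prod.Lex.toLex_lt_toLex]
      rw [hxa, hyb]
      rcases hab with h | ⟨he, hlt⟩
      · exact Or.inl h
      · exact Or.inr ⟨by rw [he], by
          rw [Prod.Lex.toLex_lt_toLex]; exact Or.inl hlt⟩
  -- B's sorted list is exactly the concatenated blocks
  have hB : PySem.List.sorted E lk = ko.flatMap block :=
    PySem.List.sorted_eq_of_perm_of_pairwise_lt E (ko.flatMap block) lk hperm hpw
  -- A's loops: inner loop = one filtered column, outer loop = flatMap
  set grid : List (List Char) := (PySem.List.pyRange 0
      (PySem.Int.floordiv ((s.length : Int) + (K : Int) - 1) (K : Int)) 1).map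
      (fun r => PySem.List.slice s (some (r * (K : Int))) (some ((r + 1) * (K : Int)))) with hgrid
  set colA : Int → List Char := fun c =>
    (grid.filter (fun row => decide (c < (row.length : Int)))).map
      (fun row => PySem.List.pyGetD row c ' ') with hcolA
  have hinner : ∀ (acc : List Char) (c : Int),
      grid.foldl (fun acc row =>
        if c < (row.length : Int) then acc ++ [PySem.List.pyGetD row c ' '] else acc) acc
        = acc ++ colA c :=
    fun acc c => PySem.List.foldl_append_ite _ _ _ _
  have houter : ko.foldl (fun acc c => grid.foldl (fun acc row =>
        if c < (row.length : Int) then acc ++ [PySem.List.pyGetD row c ' '] else acc) acc) []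
      = ko.foldl (fun acc c => acc ++ colA c) [] :=
    PySem.List.foldl_congr_mem _ _ _ _ (fun acc c _ => hinner acc c)
  rw [houter, PySem.List.foldl_append_eq_flatMap, List.nil_append]
  have hcols : ko.flatMap colA = ko.flatMap (fun c => (block c).map Prod.snd) := by
    apply List.flatMap_congr
    intro c hc
    obtain ⟨cN, hcN, rfl⟩ := hkomem c hc
    exact pv_col s kl cN hK hcN
  rw [hcols, ← List.map_flatMap, ← hB]


-- ===== VERDICT (by name: the statement is the Claim_ definition above) =====
theorem hybrid_substitution_transposition_spec : Claim_equal_hybrid_substitution_transposition := by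
  intro text key _ hpre
  unfold Spec_hybrid_substitution_transposition
  have hk : key.toList ≠ [] := fun h => hpre (String.toList_eq_nil_iff.mp h)
  simp only [hybrid_substitution_transposition, hybrid_substitution_transposition_alt]
  exact congrArg String.ofList (pv_main (((PySem.Str.upper text).toList).map pvSubChar) key.toList hk)
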